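-- pv_equiv track=rewrite | github.com/bhatt40/advent-of-code | 2019/day-16/day-16.py | execute_phase_with_shortcut
-- ===== SOURCE A (Python) =====
-- def execute_phase_with_shortcut(input):
--     # Based on pattern that occurs.
--
--     def get_next_value(input):
--         input_sum = sum(input)
--         index = 0
--         while index < len(input):
--             v = input_sum % 10
--             input_sum -= input[index]
--             index += 1
--             yield v
--
--     return [
--         x for x in get_next_value(input)
--     ]
-- ===== SOURCE B (Python) =====
-- def execute_phase_with_shortcut(input):
--     out = []
--     running = 0
--     for x in reversed(input):
--         running += x
--         out.append(running % 10)
--     out.reverse()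
--     return out
-- ===== Notes on version B (the rewrite author's own statement) =====
-- stated objective: simpler
-- what changed: B scans the list back-to-front maintaining a running suffix sum and records running % 10 as it goes (then reverses), instead of A's generator that first computes the full sum and then repeatedly subtracts a prefix element while yielding.
import Mathlib
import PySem

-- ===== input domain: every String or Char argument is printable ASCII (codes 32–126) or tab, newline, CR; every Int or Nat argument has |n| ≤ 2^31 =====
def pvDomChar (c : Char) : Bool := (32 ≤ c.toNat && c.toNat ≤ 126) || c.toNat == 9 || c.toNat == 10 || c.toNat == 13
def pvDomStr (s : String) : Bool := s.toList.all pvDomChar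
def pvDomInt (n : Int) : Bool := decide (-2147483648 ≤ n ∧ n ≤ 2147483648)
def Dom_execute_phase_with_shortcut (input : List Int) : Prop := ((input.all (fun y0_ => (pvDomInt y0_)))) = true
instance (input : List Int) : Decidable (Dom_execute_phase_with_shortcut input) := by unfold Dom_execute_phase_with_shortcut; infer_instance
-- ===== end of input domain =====

-- B replaces A's "compute the total sum, then subtract a prefix element after each yield"
-- generator by a back-to-front scan that grows a running suffix sum; same O(n) cost, simpler.

-- ===== PORT A =====
-- A's generator: holds input_sum, yields input_sum % 10, then subtracts input[index].
-- Ported as structural recursion over the remaining list with input_sum as the state.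
def pvAGen (input_sum : Int) : List Int → List Int
  | [] => []
  | x :: xs => PySem.Int.mod input_sum 10 :: pvAGen (input_sum - x) xs

def execute_phase_with_shortcut (input : List Int) : List Int :=
  pvAGen input.sum input

-- ===== PORT B =====
-- B's loop over reversed(input): state is (running, out); out.reverse() at the end.
def execute_phase_with_shortcut_alt (input : List Int) : List Int :=
  let st := input.reverse.foldl
    (fun (st : Int × List Int) x =>
      let running := st.1 + x
      (running, st.2 ++ [PySem.Int.mod running 10])) (0, [])
  st.2.reverse

-- ===== PRECONDITION & SPEC =====
def Spec_execute_phase_with_shortcut (input : List Int) (out : List Int) : Prop := out = execute_phase_with_shortcut_alt input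
instance (input : List Int) (out : List Int) : Decidable (Spec_execute_phase_with_shortcut input out) := by unfold Spec_execute_phase_with_shortcut; infer_instance

-- ===== CLAIM (what is proved, stated in full; the proofs are below) =====
def Claim_equal_execute_phase_with_shortcut : Prop := ∀ (input : List Int), Dom_execute_phase_with_shortcut input → Spec_execute_phase_with_shortcut input (execute_phase_with_shortcut input)

-- ===== LEMMAS AND PROOFS =====

-- forward suffix-sum-mod list: the common value of both ports
def pvSufMod : List Int → List Int
  | [] => []
  | x :: xs => PySem.Int.mod (x + xs.sum) 10 :: pvSufMod xs

lemma pvAGen_eq_sufMod (l : List Int) : pvAGen l.sum l = pvSufMod l := by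
  induction l with
  | nil => rfl
  | cons x xs ih =>
      simp only [pvAGen, pvSufMod, List.sum_cons]
      have : x + xs.sum - x = xs.sum := by ring
      rw [this, ih]

-- B's running list, scanned forward along the (reversed) list
def pvBRun (r : Int) : List Int → List Int
  | [] => []
  | x :: xs => PySem.Int.mod (r + x) 10 :: pvBRun (r + x) xs

lemma pvB_foldl (l : List Int) (r : Int) (out : List Int) :
    (l.foldl (fun (st : Int × List Int) x =>
        (st.1 + x, st.2 ++ [PySem.Int.mod (st.1 + x) 10])) (r, out))
      = (r + l.sum, out ++ pvBRun r l) := by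
  induction l generalizing r out with
  | nil => simp [pvBRun]
  | cons x xs ih =>
      simp only [List.foldl_cons, ih, pvBRun, List.sum_cons]
      exact Prod.ext (by simp; omega) (by simp)

lemma pvBRun_append (a : List Int) (x r : Int) :
    pvBRun r (a ++ [x]) = pvBRun r a ++ [PySem.Int.mod (r + a.sum + x) 10] := by
  induction a generalizing r with
  | nil => simp [pvBRun]
  | cons y ys ih =>
      simp only [List.cons_append, pvBRun, ih, List.sum_cons]
      congr 3
      ring_nf

lemma pvBRun_rev (l : List Int) : (pvBRun 0 l.reverse).reverse = pvSufMod l := by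
  induction l with
  | nil => rfl
  | cons x xs ih =>
      simp only [List.reverse_cons, pvBRun_append, pvSufMod]
      rw [List.reverse_append]
      simp only [List.reverse_cons, List.reverse_nil, List.nil_append, List.singleton_append, ih]
      congr 2
      rw [List.sum_reverse]
      ring_nf

-- ===== VERDICT (by name: the statement is the Claim_ definition above) =====
theorem execute_phase_with_shortcut_spec : Claim_equal_execute_phase_with_shortcut := by
  intro input _
  unfold Spec_execute_phase_with_shortcut execute_phase_with_shortcut execute_phase_with_shortcut_alt
  have hb := pvB_foldl input.reverse 0 []
  simp only [hb, List.nil_append]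
  rw [pvAGen_eq_sufMod, ← pvBRun_rev input]
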